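-- pv_equiv track=rewrite | github.com/kageraaron/word-nexus | word_nexus_generator.py | has_morph_overlap
-- ===== SOURCE A (Python) =====
-- _SUFFIXES = [
--     "ations", "ation", "ments", "ment", "nesses", "ness",
--     "ings", "ing", "tions", "tion", "ers", "ies",
--     "est", "ful", "less", "ally", "ily", "ly", "al", "er",
--     "ed", "es", "s",
-- ]
--
-- def morph_root(word: str) -> str:
--     w = word.lower()
--     for sfx in _SUFFIXES:
--         if w.endswith(sfx) and len(w) - len(sfx) >= 3:
--             w = w[: len(w) - len(sfx)]
--             break
--     if w.endswith("e") and len(w) > 3: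
--         w = w[:-1]
--     return w
--
-- def has_morph_overlap(words: list[str]) -> bool:
--     roots = [morph_root(w) for w in words]
--     for i in range(len(roots)):
--         for j in range(i + 1, len(roots)):
--             ri, rj = roots[i], roots[j]
--             if ri == rj:
--                 return True
--             if len(ri) >= 4 and len(rj) >= 4:
--                 if ri.startswith(rj) or rj.startswith(ri):
--                     return True
--     return False
-- ===== SOURCE B (Python) =====
-- _SUFFIXES = ("ations ation ments ment nesses ness ings ing tions tion ers ies "
--              "est ful less ally ily ly al er ed es s").split()
--
-- def morph_root(word: str) -> str:
--     w = word.lower()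
--     sfx = next((s for s in _SUFFIXES if w.endswith(s) and len(s) + 3 <= len(w)), None)
--     if sfx is not None:
--         w = w[: len(w) - len(sfx)]
--     if w.endswith("e") and len(w) > 3:
--         w = w[:-1]
--     return w
--
-- def has_morph_overlap(words: list[str]) -> bool:
--     roots = [morph_root(w) for w in words]
--     if len(set(roots)) < len(roots):
--         return True
--     big = sorted(r for r in roots if len(r) >= 4)
--     return any(b.startswith(a) for a, b in zip(big, big[1:]))
-- ===== Notes on version B (the rewrite author's own statement) =====
-- stated objective: alternative
-- what changed: Replaces the all-pairs nested scan by a set-based duplicate check plus sorting the length>=4 roots and testing only adjacent pairs for prefix containment (a prefix pair in a sorted list reduces to an adjacent one by the sandwich lemma); morph_root picks the suffix with a generator/next instead of a break loop.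
import Mathlib
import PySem

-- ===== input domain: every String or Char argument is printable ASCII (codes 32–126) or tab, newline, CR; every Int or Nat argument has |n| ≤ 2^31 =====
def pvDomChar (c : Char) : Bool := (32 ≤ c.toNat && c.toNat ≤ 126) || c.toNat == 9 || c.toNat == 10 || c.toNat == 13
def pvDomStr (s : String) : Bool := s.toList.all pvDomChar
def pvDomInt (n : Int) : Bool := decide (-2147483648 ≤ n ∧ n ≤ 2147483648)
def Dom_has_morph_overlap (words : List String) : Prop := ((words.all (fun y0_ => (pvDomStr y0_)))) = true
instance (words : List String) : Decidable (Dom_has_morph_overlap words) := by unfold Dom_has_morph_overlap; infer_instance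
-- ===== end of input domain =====

-- B replaces A's all-pairs scan by a set-based duplicate check plus a sort of the
-- length-≥4 roots with an adjacent-pair prefix test; the return values are proved equal.

-- ===== PORT A =====
-- module constant _SUFFIXES as A writes it (a list literal)
def pvSuffixes : List String := [
  "ations", "ation", "ments", "ment", "nesses", "ness",
  "ings", "ing", "tions", "tion", "ers", "ies",
  "est", "ful", "less", "ally", "ily", "ly", "al", "er",
  "ed", "es", "s"]

-- the 'for sfx in _SUFFIXES: … break' loop of A's morph_root
def pvStripSuffix : List String → String → String
  | [], w => w
  | sfx :: rest, w =>
      if PySem.Str.endswith w sfx && decide (3 ≤ (PySem.Str.len w : Int) - (PySem.Str.len sfx : Int)) then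
        PySem.Str.slice w none (some ((PySem.Str.len w : Int) - (PySem.Str.len sfx : Int)))
      else pvStripSuffix rest w

def morphRoot (word : String) : String :=
  let w := PySem.Str.lower word
  let w := pvStripSuffix pvSuffixes w
  if PySem.Str.endswith w "e" && decide (3 < PySem.Str.len w) then
    PySem.Str.slice w none (some (-1))
  else w

def has_morph_overlap (words : List String) : Bool :=
  let roots := words.map morphRoot
  (PySem.List.pyRange 0 (roots.length : Int) 1).any fun i =>
    (PySem.List.pyRange (i + 1) (roots.length : Int) 1).any fun j =>
      let ri := PySem.List.pyGetD roots i ""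
      let rj := PySem.List.pyGetD roots j ""
      (ri == rj) ||
        ((4 ≤ PySem.Str.len ri && 4 ≤ PySem.Str.len rj) &&
          (PySem.Str.startswith ri rj || PySem.Str.startswith rj ri))

-- ===== PORT B =====
-- B's _SUFFIXES: one literal string split on whitespace
def pvSuffixesB : List String :=
  PySem.Str.split₀ "ations ation ments ment nesses ness ings ing tions tion ers ies est ful less ally ily ly al er ed es s"

-- B's morph_root: next(generator, None) → List.find?; w[:k] with k = len(w)-len(sfx) ≥ 0 → take; w[:-1] → dropLast (exact)
def morphRootB (word : String) : String :=
  let w := PySem.Str.lower word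
  let w := match pvSuffixesB.find? (fun s => PySem.Str.endswith w s && decide (PySem.Str.len s + 3 ≤ PySem.Str.len w)) with
    | some sfx => String.ofList (w.toList.take (w.toList.length - sfx.toList.length))
    | none => w
  if PySem.Str.endswith w "e" && decide (3 < PySem.Str.len w) then String.ofList w.toList.dropLast else w

def has_morph_overlap_alt (words : List String) : Bool :=
  let roots := words.map morphRootB
  if (PySem.Set.ofList roots).length < roots.length then true
  else
    let big := PySem.List.sorted (roots.filter (fun r => 4 ≤ PySem.Str.len r)) (fun r => r) false
    (big.zip (PySem.List.slice big (some 1) none)).any fun p => PySem.Str.startswith p.2 p.1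

-- ===== PRECONDITION & SPEC =====
def Spec_has_morph_overlap (words : List String) (out : Bool) : Prop := out = has_morph_overlap_alt words
instance (words : List String) (out : Bool) : Decidable (Spec_has_morph_overlap words out) := by unfold Spec_has_morph_overlap; infer_instance

-- ===== CLAIM (what is proved, stated in full; the proofs are below) =====
def Claim_equal_has_morph_overlap : Prop := ∀ (words : List String), Dom_has_morph_overlap words → Spec_has_morph_overlap words (has_morph_overlap words)

-- ===== LEMMAS AND PROOFS =====

-- B's suffix list is A's
lemma pvSuffixesB_eq : pvSuffixesB = pvSuffixes := by decide

-- B's find?-based strip equals A's break-loop strip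
lemma pvStripB_eq (l : List String) (w : String) :
    (match l.find? (fun s => PySem.Str.endswith w s && decide (PySem.Str.len s + 3 ≤ PySem.Str.len w)) with
      | some sfx => String.ofList (w.toList.take (w.toList.length - sfx.toList.length))
      | none => w) = pvStripSuffix l w := by
  induction l with
  | nil => rfl
  | cons s rest ih =>
    unfold pvStripSuffix
    rw [List.find?_cons]
    have hcond : (PySem.Str.endswith w s && decide (PySem.Str.len s + 3 ≤ PySem.Str.len w))
        = (PySem.Str.endswith w s && decide (3 ≤ (PySem.Str.len w : Int) - (PySem.Str.len s : Int))) := by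
      congr 1
      rw [decide_eq_decide]; omega
    by_cases h : (PySem.Str.endswith w s && decide (PySem.Str.len s + 3 ≤ PySem.Str.len w)) = true
    · rw [h]
      rw [hcond] at h
      rw [if_pos h]
      apply String.toList_injective
      have h3' : s.length + 3 ≤ w.length := by
        have := (Bool.and_eq_true _ _).mp h
        have h2 := of_decide_eq_true this.2
        simp [PySem.Str.len_eq] at h2
        omega
      simp [PySem.Str.toList_slice, PySem.Chars.slice_eq_listSlice]
      rw [PySem.List.slice_to _ (by omega : (0 : Int) ≤ (w.length : Int) - (s.length : Int))]
      congr 1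
      omega
    · rw [Bool.not_eq_true] at h
      rw [h]
      rw [hcond] at h
      rw [if_neg (by rw [h]; exact Bool.false_ne_true)]
      exact ih

-- B's morph_root equals A's
lemma morphRootB_eq (word : String) : morphRootB word = morphRoot word := by
  simp only [morphRootB, morphRoot, pvSuffixesB_eq]
  rw [pvStripB_eq]
  set w := pvStripSuffix pvSuffixes (PySem.Str.lower word)
  by_cases h : (PySem.Str.endswith w "e" && decide (3 < PySem.Str.len w)) = true
  · rw [if_pos h, if_pos h]
    apply String.toList_injective
    simp [PySem.List.slice_to_neg_one]
  · rw [Bool.not_eq_true] at h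
    rw [if_neg (by rw [h]; exact Bool.false_ne_true), if_neg (by rw [h]; exact Bool.false_ne_true)]

-- the per-pair test of A's inner loop
def pvHit (a b : String) : Bool :=
  (a == b) ||
    ((4 ≤ PySem.Str.len a && 4 ≤ PySem.Str.len b) &&
      (PySem.Str.startswith a b || PySem.Str.startswith b a))

lemma pvHit_symm (a b : String) : pvHit a b = pvHit b a := by
  simp [pvHit, Bool.or_comm, Bool.and_comm, BEq.comm]

-- prefix implies ≤ in the lexicographic order on List Char
lemma pvPrefix_le : ∀ (a b : List Char), a <+: b → a ≤ b := by
  intro a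
  induction a with
  | nil => intro b _; rw [← not_lt]; exact List.not_lex_nil
  | cons c a' ih =>
    intro b h
    obtain ⟨d, b', rfl⟩ : ∃ d b', b = d :: b' := by
      rcases b with _ | ⟨d, b'⟩
      · exact absurd h (by simp)
      · exact ⟨d, b', rfl⟩
    rw [List.cons_prefix_cons] at h
    obtain ⟨rfl, h2⟩ := h
    rw [← not_lt]
    intro hlex
    have : List.Lex (· < ·) b' a' := (List.lex_cons_iff).mp hlex
    exact absurd this (not_lt.mpr (ih b' h2))

-- lexicographic sandwich: x ≤ y ≤ z and x a prefix of z ⇒ x a prefix of y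
lemma pvSandwich : ∀ (x y z : List Char), x ≤ y → y ≤ z → x <+: z → x <+: y := by
  intro x
  induction x with
  | nil => intro y z _ _ _; exact List.nil_prefix
  | cons c x' ih =>
    intro y z hxy hyz hxz
    obtain ⟨z', rfl, hxz'⟩ : ∃ z', z = c :: z' ∧ x' <+: z' := by
      rcases z with _ | ⟨e, z'⟩
      · exact absurd hxz (by simp)
      · rw [List.cons_prefix_cons] at hxz; exact ⟨z', by rw [hxz.1], hxz.2⟩
    rcases y with _ | ⟨d, y'⟩
    · exact absurd (List.Lex.nil : List.Lex (· < ·) [] (c :: x')) (not_lt.mpr hxy)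
    rcases lt_trichotomy c d with hcd | hcd | hcd
    · exact absurd (List.Lex.rel hcd : List.Lex (· < ·) (c :: z') (d :: y')) (not_lt.mpr hyz)
    · subst hcd
      have h1 : x' ≤ y' := not_lt.mp (fun hl => (not_lt.mpr hxy) (List.lex_cons_iff.mpr hl))
      have h2 : y' ≤ z' := not_lt.mp (fun hl => (not_lt.mpr hyz) (List.lex_cons_iff.mpr hl))
      exact List.cons_prefix_cons.mpr ⟨rfl, ih y' z' h1 h2 hxz'⟩
    · exact absurd (List.Lex.rel hcd : List.Lex (· < ·) (d :: y') (c :: x')) (not_lt.mpr hxy)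

-- A = true iff some i<j pair of roots hits
lemma pvA_iff (words : List String) :
    has_morph_overlap words = true ↔
      ¬ (words.map morphRoot).Pairwise (fun a b => pvHit a b = false) := by
  unfold has_morph_overlap
  show ((PySem.List.pyRange 0 ((words.map morphRoot).length : Int) 1).any fun i =>
    (PySem.List.pyRange (i + 1) ((words.map morphRoot).length : Int) 1).any fun j =>
      pvHit (PySem.List.pyGetD (words.map morphRoot) i "")
        (PySem.List.pyGetD (words.map morphRoot) j "")) = true ↔ _
  generalize (words.map morphRoot) = roots
  rw [List.any_eq_true]
  constructor
  · rintro ⟨i, hi, hinner⟩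
    rw [List.any_eq_true] at hinner
    obtain ⟨j, hj, hhit⟩ := hinner
    rw [PySem.List.mem_pyRange_one] at hi hj
    intro hpw
    have h0i : 0 ≤ i := hi.1
    have h0j : 0 ≤ j := le_trans (by omega) hj.1
    rw [PySem.List.pyGetD_eq_getElem roots "" h0i (by omega),
        PySem.List.pyGetD_eq_getElem roots "" h0j (by omega)] at hhit
    have := List.pairwise_iff_getElem.mp hpw i.toNat j.toNat (by omega) (by omega) (by omega)
    rw [this] at hhit
    exact Bool.noConfusion hhit
  · intro hpw
    rw [List.pairwise_iff_getElem] at hpw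
    push_neg at hpw
    obtain ⟨i, j, hi, hj, hij, hne⟩ := hpw
    have hhit : pvHit roots[i] roots[j] = true := by
      cases h : pvHit roots[i] roots[j] with
      | false => exact absurd h hne
      | true => rfl
    refine ⟨(i : Int), ?_, ?_⟩
    · rw [PySem.List.mem_pyRange_one]; omega
    · rw [List.any_eq_true]
      refine ⟨(j : Int), ?_, ?_⟩
      · rw [PySem.List.mem_pyRange_one]; omega
      · rw [PySem.List.pyGetD_eq_getElem roots "" (by omega) (by omega),
            PySem.List.pyGetD_eq_getElem roots "" (by omega) (by omega)]
        simpa using hhit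

-- len(set(l)) < len(l) iff l has a duplicate
lemma pvDupLen_iff (l : List String) : (PySem.Set.ofList l).length < l.length ↔ ¬ l.Nodup := by
  constructor
  · intro hlt hnd
    rw [PySem.Set.ofList_eq_self_of_nodup l hnd] at hlt
    exact lt_irrefl _ hlt
  · intro hnd
    rcases lt_or_eq_of_le (PySem.Set.length_ofList_le l) with h | h
    · exact h
    · exfalso
      have hsub : List.Subperm (PySem.Set.ofList l) l :=
        List.Nodup.subperm (PySem.Set.nodup_ofList l) (fun x hx => (PySem.Set.mem_ofList l x).mp hx)
      have hperm := hsub.perm_of_length_le (le_of_eq h.symm)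
      exact hnd (hperm.nodup_iff.mp (PySem.Set.nodup_ofList l))

-- any over zip-with-tail is an adjacent-index test
lemma pvAnyAdj_iff (l : List String) (f : String → String → Bool) :
    ((l.zip (l.tail)).any fun p => f p.1 p.2) = true ↔
      ∃ (i : Nat) (h : i + 1 < l.length), f l[i] l[i + 1] = true := by
  rw [List.any_eq_true]
  constructor
  · rintro ⟨p, hp, hf⟩
    rw [List.mem_iff_getElem] at hp
    obtain ⟨i, hi, hpe⟩ := hp
    have hlen : i + 1 < l.length := by
      have := hi
      simp [List.length_zip, List.length_tail] at this
      omega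
    have htl : i < l.tail.length := by simp [List.length_tail]; omega
    refine ⟨i, hlen, ?_⟩
    rw [(List.getElem_zip : (l.zip l.tail)[i] = (l[i], l.tail[i]'htl))] at hpe
    have ht : l.tail[i]'htl = l[i + 1] := by simp [List.getElem_tail]
    rw [ht] at hpe
    rw [← hpe] at hf
    exact hf
  · rintro ⟨i, hlen, hf⟩
    refine ⟨(l[i], l[i+1]), ?_, hf⟩
    rw [List.mem_iff_getElem]
    have htl : i < l.tail.length := by simp [List.length_tail]; omega
    have hi : i < (l.zip l.tail).length := by
      simp [List.length_zip, List.length_tail]; omega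
    refine ⟨i, hi, ?_⟩
    rw [(List.getElem_zip : (l.zip l.tail)[i] = (l[i], l.tail[i]'htl))]
    simp [List.getElem_tail]

-- crux: on a sorted duplicate-free list, no adjacent prefix ⇒ no prefix-related pair at all
lemma pvNoAdj_pairwise (l : List String) (hs : l.Pairwise (fun a b => a ≤ b)) (hn : l.Nodup)
    (hadj : ∀ (i : Nat) (h : i + 1 < l.length), ¬ l[i].toList <+: l[i + 1].toList) :
    l.Pairwise (fun a b => ¬ (b.toList <+: a.toList ∨ a.toList <+: b.toList)) := by
  rw [List.pairwise_iff_getElem]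
  intro i j hi hj hij
  have hle : l[i] ≤ l[j] := List.pairwise_iff_getElem.mp hs i j hi hj hij
  rintro (hpre | hpre)
  · have h1 : l[j].toList ≤ l[i].toList := pvPrefix_le _ _ hpre
    have h2 : l[j] ≤ l[i] := String.le_iff_toList_le.mpr h1
    have heq : l[i] = l[j] := le_antisymm hle h2
    have := (List.Nodup.getElem_inj_iff hn).mp heq
    omega
  · have hi1 : i + 1 < l.length := by omega
    have hle1 : l[i] ≤ l[i + 1] :=
      List.pairwise_iff_getElem.mp hs i (i + 1) hi hi1 (by omega)
    have hle2 : l[i + 1] ≤ l[j] := by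
      rcases eq_or_lt_of_le (Nat.succ_le_of_lt hij) with h | h
      · subst h; exact le_refl _
      · exact List.pairwise_iff_getElem.mp hs (i + 1) j hi1 hj h
    have := pvSandwich l[i].toList l[i + 1].toList l[j].toList
      (String.le_iff_toList_le.mp hle1) (String.le_iff_toList_le.mp hle2) hpre
    exact hadj i hi1 this

-- main equivalence
lemma pvMain (words : List String) : has_morph_overlap words = has_morph_overlap_alt words := by
  unfold has_morph_overlap_alt
  have hmapeq : words.map morphRootB = words.map morphRoot :=
    List.map_congr_left (fun w _ => morphRootB_eq w)
  rw [hmapeq]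
  show _ = (if (PySem.Set.ofList (words.map morphRoot)).length < (words.map morphRoot).length then true
    else ((PySem.List.sorted ((words.map morphRoot).filter (fun r => 4 ≤ PySem.Str.len r)) (fun r => r) false).zip
      (PySem.List.slice (PySem.List.sorted ((words.map morphRoot).filter (fun r => 4 ≤ PySem.Str.len r)) (fun r => r) false) (some 1) none)).any
        fun p => PySem.Str.startswith p.2 p.1)
  rw [PySem.List.slice_from_one]
  by_cases hd : (words.map morphRoot).Nodup
  · rw [if_neg (by rw [pvDupLen_iff]; exact fun h => h hd)]
    set roots := words.map morphRoot with hroots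
    set big := PySem.List.sorted (roots.filter (fun r => 4 ≤ PySem.Str.len r)) (fun r => r) false with hbig
    have hperm : big.Perm (roots.filter (fun r => 4 ≤ PySem.Str.len r)) :=
      PySem.List.sorted_perm _ _ _
    have hmemlen : ∀ x ∈ big, 4 ≤ PySem.Str.len x := by
      intro x hx
      have := hperm.mem_iff.mp hx
      exact of_decide_eq_true (List.mem_filter.mp this).2
    rw [Bool.eq_iff_iff, pvA_iff, pvAnyAdj_iff big (fun a b => PySem.Str.startswith b a)]
    rw [← hroots]
    constructor
    · -- some pair hits ⇒ some adjacent sorted prefix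
      intro hnpw
      by_contra hno
      push_neg at hno
      apply hnpw
      -- from no adjacent prefix build Pairwise (pvHit = false)
      have hadj : ∀ (i : Nat) (h : i + 1 < big.length), ¬ big[i].toList <+: big[i + 1].toList := by
        intro i h hpre
        exact hno i h (by
          rw [PySem.Str.startswith_eq]
          exact (PySem.Chars.startswith_iff _ _).mpr hpre)
      have hsorted : big.Pairwise (fun a b => a ≤ b) := PySem.List.sorted_pairwise _ _
      have hnodup : big.Nodup := hperm.nodup_iff.mpr (hd.filter _)
      have hbigpw := pvNoAdj_pairwise big hsorted hnodup hadj
      have hfiltpw : (roots.filter (fun r => 4 ≤ PySem.Str.len r)).Pairwise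
          (fun a b => ¬ (b.toList <+: a.toList ∨ a.toList <+: b.toList)) :=
        ((hperm.pairwise_iff (fun {x y} h => by rwa [Or.comm] at h)).mp hbigpw)
      have hrootpw := List.pairwise_filter.mp hfiltpw
      have hcomb := hd.and hrootpw
      refine hcomb.imp ?_
      rintro a b ⟨hne, himp⟩
      show pvHit a b = false
      unfold pvHit
      have hb : (a == b) = false := beq_eq_false_iff_ne.mpr hne
      rw [hb, Bool.false_or]
      by_cases h4 : 4 ≤ PySem.Str.len a ∧ 4 ≤ PySem.Str.len b
      · have := himp (decide_eq_true h4.1) (decide_eq_true h4.2)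
        push_neg at this
        rw [PySem.Str.startswith_eq, PySem.Str.startswith_eq,
            (Bool.eq_false_iff.mpr (fun hc => this.1 ((PySem.Chars.startswith_iff _ _).mp hc))),
            (Bool.eq_false_iff.mpr (fun hc => this.2 ((PySem.Chars.startswith_iff _ _).mp hc)))]
        simp
      · have hlen : (decide (4 ≤ PySem.Str.len a) && decide (4 ≤ PySem.Str.len b)) = false := by
          rcases not_and_or.mp h4 with h | h
          · rw [decide_eq_false h, Bool.false_and]
          · rw [decide_eq_false h, Bool.and_false]
        rw [hlen, Bool.false_and]
    · -- adjacent sorted prefix ⇒ some pair hits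
      rintro ⟨i, h, hsw⟩ hpw
      have hpwbig : big.Pairwise (fun a b => pvHit a b = false) := by
        have hfilt := hpw.filter (fun r => decide (4 ≤ PySem.Str.len r))
        exact (hperm.pairwise_iff (fun {x y} hxy => by rw [pvHit_symm]; exact hxy)).mpr hfilt
      have hfalse : pvHit big[i] big[i+1] = false :=
        List.pairwise_iff_getElem.mp hpwbig i (i+1) (by omega) h (by omega)
      have h4a : 4 ≤ PySem.Str.len big[i] := hmemlen _ (List.getElem_mem _)
      have h4b : 4 ≤ PySem.Str.len big[i+1] := hmemlen _ (List.getElem_mem _)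
      unfold pvHit at hfalse
      simp [PySem.Str.startswith_eq] at hfalse
      have hc := (hfalse.2 (by simpa [PySem.Str.len_eq] using h4a) (by simpa [PySem.Str.len_eq] using h4b)).2
      rw [PySem.Str.startswith_eq] at hsw
      rw [hsw] at hc
      exact Bool.noConfusion hc
  · rw [if_pos ((pvDupLen_iff _).mpr hd)]
    rw [pvA_iff]
    intro hpw
    apply hd
    refine hpw.imp ?_
    intro a b hab
    unfold pvHit at hab
    simp at hab
    exact hab.1

-- ===== VERDICT (by name: the statement is the Claim_ definition above) =====
theorem has_morph_overlap_spec : Claim_equal_has_morph_overlap := by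
  intro words _
  unfold Spec_has_morph_overlap
  exact pvMain words
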